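-- pv_equiv track=rewrite | github.com/JGW-JGW/LeetCodeLearning | 面试题 17.23. 最大黑方阵.py | find_col_start_of_row
-- ===== SOURCE A (Python) =====
-- from typing import List, Dict, Tuple
--
-- def find_col_start_of_row(matrix: List[List[int]], n: int, r: int, a: int) -> int:
--     col = 0
--     length = 0
--     while col < n:
--         if matrix[r][col] == 1:
--             length = 0
--             col += 1
--             continue
--
--         # 找到了 0
--         length += 1
--         if length > a:
--             return col - length + 1
--         col += 1
--
--     return -1
-- ===== SOURCE B (Python) =====
-- def find_col_start_of_row(matrix, n, r, a):
--     if n <= 0: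
--         return -1
--     row = matrix[r]
--     # boundary positions: sentinels -1 and n around the indices of the 1-cells
--     ones = [-1] + [i for i in range(n) if row[i] == 1] + [n]
--     # a maximal zero run is exactly the (possibly empty) gap between two
--     # consecutive boundaries; return the start of the first real gap longer than a
--     for p, q in zip(ones, ones[1:]):
--         g = q - p - 1
--         if g > 0 and g > a:
--             return p + 1
--     return -1
-- ===== Notes on version B (the rewrite author's own statement) =====
-- stated objective: alternative
-- what changed: B replaces A's streaming run-length counter by a two-stage boundary computation: it first collects the indices of the 1-cells (with sentinels -1 and n), then scans consecutive boundary pairs and returns p+1 for the first gap q-p-1 that is a nonempty zero run longer than a.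
-- outside the precondition, e.g. on find_col_start_of_row([[0, 0, 1]], 5, 0, 1): A returns 0, B raises IndexError
import Mathlib
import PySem

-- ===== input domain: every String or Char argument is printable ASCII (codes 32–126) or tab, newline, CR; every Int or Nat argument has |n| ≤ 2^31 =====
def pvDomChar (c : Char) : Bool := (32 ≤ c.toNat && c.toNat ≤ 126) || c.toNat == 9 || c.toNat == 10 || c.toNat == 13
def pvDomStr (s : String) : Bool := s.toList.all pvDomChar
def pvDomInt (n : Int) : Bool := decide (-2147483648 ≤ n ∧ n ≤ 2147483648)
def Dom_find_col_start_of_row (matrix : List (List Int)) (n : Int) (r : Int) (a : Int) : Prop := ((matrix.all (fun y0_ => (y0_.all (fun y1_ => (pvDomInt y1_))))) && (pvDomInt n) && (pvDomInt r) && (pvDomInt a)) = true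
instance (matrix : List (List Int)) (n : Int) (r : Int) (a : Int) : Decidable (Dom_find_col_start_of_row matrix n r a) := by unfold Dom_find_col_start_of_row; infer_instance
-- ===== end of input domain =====

-- B replaces A's streaming run-length counter by a two-stage pass: collect the
-- boundary positions of the 1-cells (with sentinels -1 and n), then scan gaps
-- between consecutive boundaries (alternative decomposition, same cost).

-- ===== PORT A =====
-- the while loop of A, recursing on the loop state (col, length)
def pvLoopA (matrix : List (List Int)) (n : Int) (r : Int) (a : Int) (col : Int) (len : Int) : Int :=
  if col < n then
    match PySem.List.pyGet? matrix r with
    | none => -1        -- Python raises IndexError here (excluded by Pre_)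
    | some row =>
      match PySem.List.pyGet? row col with
      | none => -1      -- Python raises IndexError here (excluded by Pre_)
      | some v =>
        if v = 1 then pvLoopA matrix n r a (col + 1) 0
        else if a < len + 1 then col - (len + 1) + 1
        else pvLoopA matrix n r a (col + 1) (len + 1)
  else -1
termination_by (n - col).toNat
decreasing_by all_goals omega

def find_col_start_of_row (matrix : List (List Int)) (n : Int) (r : Int) (a : Int) : Int :=
  pvLoopA matrix n r a 0 0

-- ===== PORT B =====
-- the comprehension [i for i in range(n) if row[i] == 1], scanning i upward
def pvOnesIdx (row : List Int) (i : Nat) (fuel : Nat) : List Int :=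
  match fuel with
  | 0 => []
  | f + 1 =>
    if (PySem.List.pyGet? row (i : Int)).getD 0 = 1 then (i : Int) :: pvOnesIdx row (i + 1) f
    else pvOnesIdx row (i + 1) f

-- the for-loop over zip(ones, ones[1:]): adjacent boundary pairs
def pvGaps (a : Int) : List Int → Int
  | p :: q :: t => if 0 < q - p - 1 ∧ a < q - p - 1 then p + 1 else pvGaps a (q :: t)
  | _ => -1

def find_col_start_of_row_alt (matrix : List (List Int)) (n : Int) (r : Int) (a : Int) : Int :=
  if n ≤ 0 then -1
  else
    match PySem.List.pyGet? matrix r with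
    | none => -1        -- Python raises IndexError here (excluded by Pre_)
    | some row => pvGaps a ((-1) :: (pvOnesIdx row 0 n.toNat ++ [n]))

-- ===== PRECONDITION & SPEC =====
-- Pre_ requires (for n > 0) that row r exists (Python negative indexing included) and has at
-- least n cells: with a shorter row A raises IndexError unless an early qualifying zero-run
-- lets it return first, so the whole data-dependent n > len(row) region is excluded as
-- outside the helper's contract (n is the row length in the original caller).
def Pre_find_col_start_of_row (matrix : List (List Int)) (n : Int) (r : Int) (a : Int) : Prop :=
  n ≤ 0 ∨ (PySem.List.pyGet? matrix r ≠ none ∧ n ≤ (((PySem.List.pyGet? matrix r).getD []).length : Int))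
instance (matrix : List (List Int)) (n : Int) (r : Int) (a : Int) : Decidable (Pre_find_col_start_of_row matrix n r a) := by unfold Pre_find_col_start_of_row; infer_instance

def pvWitness_find_col_start_of_row : List (List Int) × Int × Int × Int := ([[1, 0, 0, 1]], 4, 0, 1)

def Spec_find_col_start_of_row (matrix : List (List Int)) (n : Int) (r : Int) (a : Int) (out : Int) : Prop := out = find_col_start_of_row_alt matrix n r a
instance (matrix : List (List Int)) (n : Int) (r : Int) (a : Int) (out : Int) : Decidable (Spec_find_col_start_of_row matrix n r a out) := by unfold Spec_find_col_start_of_row; infer_instance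

-- ===== CLAIM (what is proved, stated in full; the proofs are below) =====
def Claim_equal_find_col_start_of_row : Prop := ∀ (matrix : List (List Int)) (n : Int) (r : Int) (a : Int), Dom_find_col_start_of_row matrix n r a → Pre_find_col_start_of_row matrix n r a → Spec_find_col_start_of_row matrix n r a (find_col_start_of_row matrix n r a)

-- ===== LEMMAS AND PROOFS =====

-- A's loop restated as structural recursion over the remaining cells
def pvAList (a : Int) : List Int → Int → Int → Int
  | [], _, _ => -1
  | v :: t, len, col =>
    if v = 1 then pvAList a t 0 (col + 1)
    else if a < len + 1 then col - (len + 1) + 1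
    else pvAList a t (len + 1) (col + 1)

-- positions of the 1-cells of xs, when xs starts at absolute column c
def pvOnesFrom : List Int → Int → List Int
  | [], _ => []
  | v :: t, c => if v = 1 then c :: pvOnesFrom t (c + 1) else pvOnesFrom t (c + 1)

theorem pvAList_cons (a v : Int) (t : List Int) (len col : Int) :
    pvAList a (v :: t) len col
      = if v = 1 then pvAList a t 0 (col + 1)
        else if a < len + 1 then col - (len + 1) + 1
        else pvAList a t (len + 1) (col + 1) := rfl

theorem pvGaps_cons2 (a p q : Int) (t : List Int) :
    pvGaps a (p :: q :: t) = if 0 < q - p - 1 ∧ a < q - p - 1 then p + 1 else pvGaps a (q :: t) := rfl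

-- every boundary after absolute column c is ≥ c
theorem pvOnesFrom_lb : ∀ (xs : List Int) (c : Int) (q : Int),
    q ∈ pvOnesFrom xs c ++ [c + xs.length] → c ≤ q := by
  intro xs
  induction xs with
  | nil =>
    intro c q hq
    simp [pvOnesFrom] at hq
    omega
  | cons v t ih =>
    intro c q hq
    rw [pvOnesFrom] at hq
    have hlen : ((v :: t).length : Int) = (t.length : Int) + 1 := by simp
    by_cases hv : v = 1
    · rw [if_pos hv] at hq
      rcases (by simpa using hq : q = c ∨ q ∈ pvOnesFrom t (c + 1) ++ [c + (v :: t).length]) with h | h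
      · omega
      · have : c + (v :: t).length = (c + 1) + t.length := by push_cast [List.length_cons]; ring
        rw [this] at h
        have := ih (c + 1) q h
        omega
    · rw [if_neg hv] at hq
      have : c + (v :: t).length = (c + 1) + t.length := by push_cast [List.length_cons]; ring
      rw [this] at hq
      have := ih (c + 1) q hq
      omega

-- main invariant: A's counter scan equals the boundary/gap scan
theorem pvAList_eq_gaps (a : Int) : ∀ (xs : List Int) (len col : Int),
    0 ≤ len → (len = 0 ∨ len ≤ a) →
    pvAList a xs len col = pvGaps a ((col - len - 1) :: (pvOnesFrom xs col ++ [col + xs.length])) := by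
  intro xs
  induction xs with
  | nil =>
    intro len col h0 hle
    show (-1 : Int) = pvGaps a [col - len - 1, col + 0]
    rw [pvGaps_cons2, if_neg (by omega)]
    rfl
  | cons v t ih =>
    intro len col h0 hle
    rw [pvAList_cons, pvOnesFrom]
    have hlen : col + ((v :: t).length : Int) = (col + 1) + (t.length : Int) := by push_cast [List.length_cons]; ring
    by_cases hv : v = 1
    · rw [if_pos hv, if_pos hv]
      rw [ih 0 (col + 1) le_rfl (Or.inl rfl)]
      rw [hlen]
      show _ = pvGaps a ((col - len - 1) :: col :: (pvOnesFrom t (col + 1) ++ [col + 1 + t.length]))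
      rw [pvGaps_cons2, if_neg (by omega)]
      norm_num
    · rw [if_neg hv, if_neg hv, hlen]
      rcases hsplit : pvOnesFrom t (col + 1) ++ [(col + 1) + (t.length : Int)] with _ | ⟨q, rest⟩
      · exact absurd hsplit (by simp)
      · have hq : col + 1 ≤ q := pvOnesFrom_lb t (col + 1) q (by rw [hsplit]; exact List.mem_cons_self)
        by_cases ha : a < len + 1
        · rw [if_pos ha]
          show _ = pvGaps a ((col - len - 1) :: q :: rest)
          rw [pvGaps_cons2, if_pos (by omega)]
          omega
        · rw [if_neg ha]
          rw [ih (len + 1) (col + 1) (by omega) (Or.inr (by omega))]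
          rw [hsplit]
          have : col + 1 - (len + 1) - 1 = col - len - 1 := by ring
          rw [this]

-- the port's index comprehension is pvOnesFrom of the corresponding segment
theorem pvOnesIdx_eq : ∀ (f : Nat) (row : List Int) (i : Nat), i + f ≤ row.length →
    pvOnesIdx row i f = pvOnesFrom ((row.drop i).take f) (i : Int) := by
  intro f
  induction f with
  | zero => intro row i h; rfl
  | succ f ih =>
    intro row i h
    have hi : i < row.length := by omega
    have hget : PySem.List.pyGet? row (i : Int) = some row[i] :=
      PySem.List.pyGet?_eq_some_getElem row (by omega) (by omega)
    have hdrop : row.drop i = row[i] :: row.drop (i + 1) := List.drop_eq_getElem_cons hi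
    rw [pvOnesIdx, hget, hdrop]
    show _ = pvOnesFrom (row[i] :: (row.drop (i + 1)).take f) (i : Int)
    rw [pvOnesFrom]
    have hcast : ((i : Int) + 1) = ((i + 1 : Nat) : Int) := by push_cast [List.length_cons]; ring
    by_cases hv : row[i] = 1
    · rw [if_pos (by simpa using hv), if_pos hv, ih row (i + 1) (by omega), hcast]
    · rw [if_neg (by simpa using hv), if_neg hv, ih row (i + 1) (by omega), hcast]

-- A's while loop equals pvAList on the first-n segment (valid index accesses)
theorem pvLoopA_eq_aList (matrix : List (List Int)) (n r a : Int) (row : List Int)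
    (hrow : PySem.List.pyGet? matrix r = some row) (hlen : n ≤ (row.length : Int)) :
    ∀ (k : Nat) (col len : Int), (n - col).toNat = k → 0 ≤ col →
      pvLoopA matrix n r a col len = pvAList a ((row.take n.toNat).drop col.toNat) len col := by
  intro k
  induction k with
  | zero =>
    intro col len hk hcol
    have hnc : ¬ col < n := by omega
    rw [pvLoopA, if_neg hnc]
    have : (row.take n.toNat).length ≤ col.toNat := by
      simp [List.length_take]; omega
    rw [List.drop_eq_nil_of_le this]
    rfl
  | succ k ih =>
    intro col len hk hcol
    have hcn : col < n := by omega
    have hcl : col.toNat < (row.take n.toNat).length := by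
      simp [List.length_take]; omega
    have hcl' : col.toNat < row.length := by omega
    have hget : PySem.List.pyGet? row col = some row[col.toNat] :=
      PySem.List.pyGet?_eq_some_getElem row hcol (by omega)
    rw [pvLoopA, if_pos hcn, hrow]
    show (match PySem.List.pyGet? row col with
      | none => (-1 : Int)
      | some v =>
        if v = 1 then pvLoopA matrix n r a (col + 1) 0
        else if a < len + 1 then col - (len + 1) + 1
        else pvLoopA matrix n r a (col + 1) (len + 1)) = _
    rw [hget]
    show (if row[col.toNat] = 1 then pvLoopA matrix n r a (col + 1) 0
        else if a < len + 1 then col - (len + 1) + 1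
        else pvLoopA matrix n r a (col + 1) (len + 1)) = _
    have hdrop : (row.take n.toNat).drop col.toNat
        = (row.take n.toNat)[col.toNat] :: (row.take n.toNat).drop (col.toNat + 1) :=
      List.drop_eq_getElem_cons hcl
    have hgt : (row.take n.toNat)[col.toNat] = row[col.toNat] := List.getElem_take
    have hsucc : (col + 1).toNat = col.toNat + 1 := by omega
    rw [hdrop, hgt, pvAList_cons]
    by_cases hv : row[col.toNat] = 1
    · rw [if_pos hv, if_pos hv, ih (col + 1) 0 (by omega) (by omega), hsucc]
    · rw [if_neg hv, if_neg hv]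
      by_cases ha : a < len + 1
      · rw [if_pos ha, if_pos ha]
      · rw [if_neg ha, if_neg ha, ih (col + 1) (len + 1) (by omega) (by omega), hsucc]

-- ===== VERDICT (by name: the statement is the Claim_ definition above) =====
theorem find_col_start_of_row_spec : Claim_equal_find_col_start_of_row := by
  intro matrix n r a _ hpre
  unfold Spec_find_col_start_of_row find_col_start_of_row find_col_start_of_row_alt
  by_cases hn : n ≤ 0
  · rw [if_pos hn, pvLoopA, if_neg (by omega)]
  · rw [if_neg hn]
    rcases hpre with h | ⟨hne, hlen⟩
    · omega
    · rcases hget : PySem.List.pyGet? matrix r with _ | row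
      · exact absurd hget hne
      · rw [hget] at hlen
        simp only [Option.getD_some] at hlen
        rw [pvLoopA_eq_aList matrix n r a row hget hlen (n - 0).toNat 0 0 rfl le_rfl]
        simp only [Int.toNat_zero, List.drop_zero]
        rw [pvAList_eq_gaps a (row.take n.toNat) 0 0 le_rfl (Or.inl rfl)]
        rw [pvOnesIdx_eq n.toNat row 0 (by omega)]
        simp only [List.drop_zero]
        have h1 : (0 : Int) - 0 - 1 = -1 := by ring
        have h2 : (0 : Int) + ((row.take n.toNat).length : Int) = n := by
          simp [List.length_take]; omega
        rw [h1, h2]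
        norm_num
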